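-- pv_equiv track=rewrite | github.com/AlisherXujanov/Fullstack14 | backend/python/10-built-ins/Oybek.py | find_difference_and_nearest
-- ===== SOURCE A (Python) =====
-- def find_difference_and_nearest(nums:list[int]) -> int:
--     negatives = sorted([num for num in nums if num < 0])
--     positives = sorted([num for num in nums if num >= 0])
--
--     min_positive = positives[0]
--     max_negative = negatives[-1]
--     difference = min_positive - max_negative
--
--     counter = 0
--     while True:
--         if difference + counter in nums:
--             return difference, difference + counter
--         elif difference - counter in nums:
--             return difference, difference - counter
--         else:
--             counter += 1
-- ===== SOURCE B (Python) =====
-- def find_difference_and_nearest(nums):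
--     min_positive = min(x for x in nums if x >= 0)
--     max_negative = max(x for x in nums if x < 0)
--     difference = min_positive - max_negative
--     best = nums[0]
--     for x in nums[1:]:
--         if (abs(x - difference), -x) < (abs(best - difference), -best):
--             best = x
--     return difference, best
-- ===== Notes on version B (the rewrite author's own statement) =====
-- stated objective: faster
-- what changed: A sorts both sign-classes and then probes membership of difference+/-counter in the list until a hit (O(n) scan per probe, up to the gap many probes); B computes min/max in one pass and finds the nearest element by a single fold over the list with the key (|x-d|, -x), removing both the sorts and the counter/membership loop.
import Mathlib
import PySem

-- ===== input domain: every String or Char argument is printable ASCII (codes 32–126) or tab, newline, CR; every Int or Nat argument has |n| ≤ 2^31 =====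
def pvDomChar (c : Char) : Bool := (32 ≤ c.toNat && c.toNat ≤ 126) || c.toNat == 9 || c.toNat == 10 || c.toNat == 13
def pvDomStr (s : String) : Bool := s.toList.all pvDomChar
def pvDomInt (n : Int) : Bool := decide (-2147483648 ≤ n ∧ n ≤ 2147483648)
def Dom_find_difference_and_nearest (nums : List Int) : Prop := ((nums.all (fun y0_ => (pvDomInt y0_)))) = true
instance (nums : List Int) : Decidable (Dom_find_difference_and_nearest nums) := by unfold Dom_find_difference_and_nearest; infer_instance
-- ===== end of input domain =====

-- B replaces A's sorts and expanding membership search with one O(n) pass (min, max, then a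
-- single fold picking the element nearest to the difference, larger value on ties).

-- ===== PORT A =====
-- A's 'while True' search loop; the Nat fuel is only a totality guard (chosen large enough
-- below that the loop always hits before it runs out when nums is nonempty).
def pvLoopA (nums : List Int) (d : Int) : Nat → Int → Int × Int
  | 0, _ => (d, d)
  | fuel + 1, c =>
    if d + c ∈ nums then (d, d + c)
    else if d - c ∈ nums then (d, d - c)
    else pvLoopA nums d fuel (c + 1)

def find_difference_and_nearest (nums : List Int) : Int × Int :=
  let negatives := PySem.List.sorted (nums.filter (fun num => num < 0)) (fun x => x)
  let positives := PySem.List.sorted (nums.filter (fun num => num ≥ 0)) (fun x => x)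
  match PySem.List.pyGet? positives 0, PySem.List.pyGet? negatives (-1) with
  | some min_positive, some max_negative =>
    let difference := min_positive - max_negative
    pvLoopA nums difference
      ((nums.map (fun x => (x - difference).natAbs)).foldl max 0 + 1) 0
  | _, _ => (0, 0)  -- Python raises IndexError here; excluded by Pre_

-- ===== PORT B =====
-- the loop body of Source B: keep x if (abs(x-d), -x) < (abs(best-d), -best)
def pvStep (d best x : Int) : Int :=
  if (x - d).natAbs < (best - d).natAbs ∨
     ((x - d).natAbs = (best - d).natAbs ∧ -x < -best) then x else best

def find_difference_and_nearest_alt (nums : List Int) : Int × Int :=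
  match PySem.List.min? (nums.filter (fun x => x ≥ 0)) (fun x => x) with
  | none => (0, 0)  -- Python raises ValueError here; excluded by Pre_
  | some min_positive =>
    match PySem.List.max? (nums.filter (fun x => x < 0)) (fun x => x) with
    | none => (0, 0)  -- Python raises ValueError here; excluded by Pre_
    | some max_negative =>
      let d := min_positive - max_negative
      match nums with
      | [] => (0, 0)  -- unreachable: nums has a nonnegative element here
      | b :: rest => (d, rest.foldl (pvStep d) b)

-- ===== PRECONDITION & SPEC =====
-- Pre_ excludes exactly the inputs with no negative or no nonnegative element, on which
-- Python A raises IndexError (and B raises ValueError).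
def Pre_find_difference_and_nearest (nums : List Int) : Prop :=
  (nums.any (fun x => x < 0)) = true ∧ (nums.any (fun x => x ≥ 0)) = true
instance (nums : List Int) : Decidable (Pre_find_difference_and_nearest nums) := by
  unfold Pre_find_difference_and_nearest; infer_instance

def pvWitness_find_difference_and_nearest : List Int := [-2, 3, 7]

def Spec_find_difference_and_nearest (nums : List Int) (out : Int × Int) : Prop := out = find_difference_and_nearest_alt nums
instance (nums : List Int) (out : Int × Int) : Decidable (Spec_find_difference_and_nearest nums out) := by unfold Spec_find_difference_and_nearest; infer_instance

-- ===== CLAIM (what is proved, stated in full; the proofs are below) =====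
def Claim_equal_find_difference_and_nearest : Prop := ∀ (nums : List Int), Dom_find_difference_and_nearest nums → Pre_find_difference_and_nearest nums → Spec_find_difference_and_nearest nums (find_difference_and_nearest nums)

-- ===== LEMMAS AND PROOFS =====

-- "x is at least as good a candidate as y": strictly closer to d, or equally close and ≥ y
def pvKle (d x y : Int) : Prop :=
  (x - d).natAbs < (y - d).natAbs ∨ ((x - d).natAbs = (y - d).natAbs ∧ y ≤ x)

lemma pvKle_trans {d a b c : Int} (h1 : pvKle d a b) (h2 : pvKle d b c) : pvKle d a c := by
  unfold pvKle at *; omega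

lemma pvStep_spec (d b x : Int) :
    (pvStep d b x = b ∨ pvStep d b x = x) ∧ pvKle d (pvStep d b x) b ∧ pvKle d (pvStep d b x) x := by
  unfold pvStep pvKle; split_ifs with h
  · exact ⟨Or.inr rfl, by omega, by omega⟩
  · exact ⟨Or.inl rfl, by omega, by omega⟩

-- the fold of Source B returns a member that is pvKle-minimal over the whole list
lemma pvFold_spec (d : Int) : ∀ (rest : List Int) (b : Int),
    (rest.foldl (pvStep d) b ∈ b :: rest) ∧ ∀ y ∈ b :: rest, pvKle d (rest.foldl (pvStep d) b) y := by
  intro rest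
  induction rest with
  | nil => intro b; exact ⟨List.mem_singleton.mpr rfl, by
      intro y hy; rw [List.mem_singleton] at hy; subst hy
      exact Or.inr ⟨rfl, le_refl _⟩⟩
  | cons x rest ih =>
    intro b
    have hfc : List.foldl (pvStep d) b (x :: rest) = List.foldl (pvStep d) (pvStep d b x) rest := rfl
    rw [hfc]
    obtain ⟨hmem, hmin⟩ := ih (pvStep d b x)
    obtain ⟨hcase, hkb, hkx⟩ := pvStep_spec d b x
    have hself : pvKle d (rest.foldl (pvStep d) (pvStep d b x)) (pvStep d b x) :=
      hmin _ (List.mem_cons_self ..)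
    refine ⟨?_, ?_⟩
    · rcases List.mem_cons.mp hmem with h | h
      · rcases hcase with hc | hc <;> rw [h, hc] <;> simp
      · simp only [List.mem_cons]; tauto
    · intro y hy
      rcases List.mem_cons.mp hy with h | h
      · subst h; exact pvKle_trans hself hkb
      rcases List.mem_cons.mp h with h | h
      · subst h; exact pvKle_trans hself hkx
      · exact hmin y (List.mem_cons_of_mem _ h)

-- A's expanding search returns exactly the pvKle-minimal member, given enough fuel
lemma pvLoopA_eq (nums : List Int) (d r : Int) (hmem : r ∈ nums)
    (hmin : ∀ y ∈ nums, pvKle d r y) :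
    ∀ (fuel : Nat) (c : Int), 0 ≤ c →
      (∀ y ∈ nums, c ≤ ((y - d).natAbs : Int)) →
      ((r - d).natAbs : Int) < c + fuel →
      pvLoopA nums d fuel c = (d, r) := by
  intro fuel
  induction fuel with
  | zero =>
    intro c _ hinv hfuel
    exact absurd (hinv r hmem) (by omega)
  | succ fuel ih =>
    intro c hc hinv hfuel
    rw [pvLoopA]
    by_cases h1 : d + c ∈ nums
    · rw [if_pos h1]
      have hb := hmin (d + c) h1
      have hr := hinv r hmem
      unfold pvKle at hb
      have : r = d + c := by omega
      rw [this]
    · rw [if_neg h1]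
      by_cases h2 : d - c ∈ nums
      · rw [if_pos h2]
        have hb := hmin (d - c) h2
        have hr := hinv r hmem
        unfold pvKle at hb
        have : r = d + c ∨ r = d - c := by omega
        rcases this with h | h
        · exact absurd (h ▸ hmem) h1
        · rw [h]
      · rw [if_neg h2]
        apply ih (c + 1) (by omega)
        · intro y hy
          have := hinv y hy
          by_cases he : ((y - d).natAbs : Int) = c
          · have : y = d + c ∨ y = d - c := by omega
            rcases this with h | h
            · exact absurd (h ▸ hy) h1
            · exact absurd (h ▸ hy) h2
          · omega
        · omega

-- pairwise-≤ list: every element is ≤ the last one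
lemma pvLe_getLast : ∀ (l : List Int), l.Pairwise (· ≤ ·) →
    ∀ y ∈ l, ∀ h : l ≠ [], y ≤ l.getLast h := by
  intro l
  induction l with
  | nil => intro _ y hy; cases hy
  | cons a t ih =>
    intro hp y hy h
    rcases List.pairwise_cons.mp hp with ⟨ha, ht⟩
    cases t with
    | nil => simp at hy ⊢; omega
    | cons b t' =>
      rw [List.getLast_cons (by simp)]
      rcases List.mem_cons.mp hy with h' | h'
      · subst h'
        exact le_trans (ha _ (List.mem_cons_self ..)) (ih ht _ (List.mem_cons_self ..) (by simp))
      · exact ih ht y h' (by simp)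

-- ===== VERDICT (by name: the statement is the Claim_ definition above) =====
theorem find_difference_and_nearest_spec : Claim_equal_find_difference_and_nearest := by
  intro nums _ hPre
  unfold Pre_find_difference_and_nearest at hPre
  obtain ⟨hneg, hpos⟩ := hPre
  rw [List.any_eq_true] at hneg hpos
  obtain ⟨xn, hxn, hxn'⟩ := hneg
  obtain ⟨xp, hxp, hxp'⟩ := hpos
  simp only [decide_eq_true_eq] at hxn' hxp'
  -- the two filters, both nonempty
  set Fneg := nums.filter (fun num => num < 0) with hFneg
  set Fpos := nums.filter (fun num => num ≥ 0) with hFpos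
  have hFnegne : Fneg ≠ [] := by
    intro h
    have : xn ∈ Fneg := List.mem_filter.mpr ⟨hxn, by simpa using hxn'⟩
    rw [h] at this; cases this
  have hFposne : Fpos ≠ [] := by
    intro h
    have : xp ∈ Fpos := List.mem_filter.mpr ⟨hxp, by simpa using hxp'⟩
    rw [h] at this; cases this
  -- B's min / max
  obtain ⟨mp, hmp⟩ : ∃ m, PySem.List.min? Fpos (fun x => x) = some m := by
    cases h : PySem.List.min? Fpos (fun x => x) with
    | none => exact absurd ((PySem.List.min?_eq_none_iff _ _).mp h) hFposne
    | some m => exact ⟨m, rfl⟩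
  obtain ⟨mn, hmn⟩ : ∃ m, PySem.List.max? Fneg (fun x => x) = some m := by
    cases h : PySem.List.max? Fneg (fun x => x) with
    | none => exact absurd ((PySem.List.max?_eq_none_iff _ _).mp h) hFnegne
    | some m => exact ⟨m, rfl⟩
  have hmp_mem : mp ∈ Fpos := PySem.List.min?_mem hmp
  have hmp_min : ∀ y ∈ Fpos, mp ≤ y := PySem.List.min?_isMin hmp
  have hmn_mem : mn ∈ Fneg := PySem.List.max?_mem hmn
  have hmn_max : ∀ y ∈ Fneg, y ≤ mn := PySem.List.max?_isMax hmn
  -- A's sorted heads/tails equal them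
  have hSposne : PySem.List.sorted Fpos (fun x => x) ≠ [] := fun h =>
    hFposne ((PySem.List.sorted_eq_nil_iff _ _ _).mp h)
  obtain ⟨hp0, tp, hP⟩ := List.exists_cons_of_ne_nil hSposne
  have hhp_mem : hp0 ∈ Fpos := by
    rw [← PySem.List.mem_sorted Fpos (fun x => x) false, hP]; exact List.mem_cons_self ..
  have hhp_min : ∀ y ∈ Fpos, hp0 ≤ y := PySem.List.key_head_sorted_le Fpos (fun x => x) hP
  have hpeq : hp0 = mp := le_antisymm (hhp_min mp hmp_mem) (hmp_min hp0 hhp_mem)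
  have hSnegne : PySem.List.sorted Fneg (fun x => x) ≠ [] := fun h =>
    hFnegne ((PySem.List.sorted_eq_nil_iff _ _ _).mp h)
  have hglast_mem : (PySem.List.sorted Fneg (fun x => x)).getLast hSnegne ∈ Fneg := by
    rw [← PySem.List.mem_sorted Fneg (fun x => x) false]
    exact List.getLast_mem hSnegne
  have hglast_max : ∀ y ∈ Fneg, y ≤ (PySem.List.sorted Fneg (fun x => x)).getLast hSnegne := by
    intro y hy
    apply pvLe_getLast _ (PySem.List.sorted_pairwise Fneg (fun x => x))
    rw [PySem.List.mem_sorted]; exact hy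
  have hgeq : (PySem.List.sorted Fneg (fun x => x)).getLast hSnegne = mn :=
    le_antisymm (hmn_max _ hglast_mem) (hglast_max mn hmn_mem)
  -- nums is nonempty
  have hnumsne : nums ≠ [] := by intro h; rw [h] at hxp; cases hxp
  obtain ⟨b, rest, hnums⟩ := List.exists_cons_of_ne_nil hnumsne
  -- evaluate both programs
  unfold Spec_find_difference_and_nearest
  unfold find_difference_and_nearest find_difference_and_nearest_alt
  rw [hmp, hmn]
  simp only [← hFneg, ← hFpos, hP, PySem.List.pyGet?_zero_cons, PySem.List.pyGet?_neg_one,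
    List.getLast?_eq_some_getLast hSnegne, hgeq, hpeq]
  rw [hnums]
  obtain ⟨hrmem, hrmin⟩ := pvFold_spec (mp - mn) rest b
  show pvLoopA (b :: rest) (mp - mn) _ 0 = (mp - mn, rest.foldl (pvStep (mp - mn)) b)
  apply pvLoopA_eq (b :: rest) (mp - mn) _ hrmem hrmin _ 0 (le_refl 0)
  · intro y _; exact Int.natCast_nonneg _
  · have hb := (PySem.List.le_foldl_max (((b :: rest).map (fun x => (x - (mp - mn)).natAbs))) 0).2
      ((rest.foldl (pvStep (mp - mn)) b - (mp - mn)).natAbs)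
      (List.mem_map.mpr ⟨_, hrmem, rfl⟩)
    omega
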